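-- pv_equiv track=rewrite | github.com/huseyingulme/Kriptoloji | algorithms/RouteCipher.py | _row_write
-- ===== SOURCE A (Python) =====
-- def _row_write(text: str, rows: int, cols: int) -> list:
--     """Satır satır yazar."""
--     matrix = [[' ' for _ in range(cols)] for _ in range(rows)]
--     text_idx = 0
--     for i in range(rows):
--         for j in range(cols):
--             if text_idx < len(text):
--                 matrix[i][j] = text[text_idx]
--                 text_idx += 1
--     return matrix
-- ===== SOURCE B (Python) =====
-- def _row_write(text: str, rows: int, cols: int) -> list:
--     """Row-wise slice-and-pad: no per-cell index counter."""
--     cols = max(cols, 0)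
--     matrix = []
--     for i in range(rows):
--         chunk = text[i * cols:(i + 1) * cols]
--         matrix.append(list(chunk) + [' '] * (cols - len(chunk)))
--     return matrix
-- ===== Notes on version B (the rewrite author's own statement) =====
-- stated objective: simpler
-- what changed: Replaces the pre-built space matrix mutated cell-by-cell under a running text_idx bounds check with a direct row-wise build: each row is one slice of the text padded with spaces to width, so the index counter and the conditional per-cell write disappear.
import Mathlib
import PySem

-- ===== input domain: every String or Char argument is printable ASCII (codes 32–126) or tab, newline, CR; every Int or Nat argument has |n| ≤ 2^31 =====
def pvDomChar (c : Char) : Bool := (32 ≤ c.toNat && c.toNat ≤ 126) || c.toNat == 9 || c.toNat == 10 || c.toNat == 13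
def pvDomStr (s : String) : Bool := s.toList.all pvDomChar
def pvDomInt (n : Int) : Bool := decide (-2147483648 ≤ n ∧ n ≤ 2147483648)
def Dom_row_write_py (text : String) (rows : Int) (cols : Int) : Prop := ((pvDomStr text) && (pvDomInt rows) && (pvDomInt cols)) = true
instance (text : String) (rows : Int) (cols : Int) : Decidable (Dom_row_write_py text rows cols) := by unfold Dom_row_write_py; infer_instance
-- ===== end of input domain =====

-- B builds each row directly as a slice of the text padded with spaces; A pre-builds a space
-- matrix and overwrites it cell by cell under a running text_idx counter. Return values proved equal.

-- ===== PORT A =====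
-- literal port of A: build the all-space matrix, then the nested loop carrying (matrix, text_idx);
-- matrix[i][j] = c is List.modify/List.set; text[text_idx] under the guard text_idx < len is getD (exact there)
def row_write_py (text : String) (rows : Int) (cols : Int) : List (List String) :=
  let cs := text.toList
  let matrix : List (List String) :=
    (PySem.List.pyRange 0 rows 1).map (fun _ => (PySem.List.pyRange 0 cols 1).map (fun _ => " "))
  let st :=
    (PySem.List.pyRange 0 rows 1).foldl (fun (st : List (List String) × Nat) i =>
      (PySem.List.pyRange 0 cols 1).foldl (fun st j =>
        if st.2 < cs.length then
          (st.1.modify i.toNat (fun row => row.set j.toNat (String.singleton (cs.getD st.2 ' '))), st.2 + 1)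
        else st) st) (matrix, 0)
  st.1

-- ===== PORT B =====
-- literal port of B: cols clamped to ≥ 0 once, then one row per i: slice ++ space padding
def row_write_py_alt (text : String) (rows : Int) (cols : Int) : List (List String) :=
  let cs := text.toList
  let c := max cols 0
  (PySem.List.pyRange 0 rows 1).map (fun i =>
    let chunk := PySem.List.slice cs (some (i * c)) (some ((i + 1) * c))
    chunk.map (fun ch => String.singleton ch) ++ List.replicate (c - (chunk.length : Int)).toNat " ")

-- ===== PRECONDITION & SPEC =====
def Spec_row_write_py (text : String) (rows : Int) (cols : Int) (out : List (List String)) : Prop := out = row_write_py_alt text rows cols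
instance (text : String) (rows : Int) (cols : Int) (out : List (List String)) : Decidable (Spec_row_write_py text rows cols out) := by unfold Spec_row_write_py; infer_instance

-- ===== CLAIM (what is proved, stated in full; the proofs are below) =====
def Claim_equal_row_write_py : Prop := ∀ (text : String) (rows : Int) (cols : Int), Dom_row_write_py text rows cols → Spec_row_write_py text rows cols (row_write_py text rows cols)

-- ===== LEMMAS AND PROOFS =====

-- the row both programs produce for text characters starting at offset k, width m
def pvRowAt (cs : List Char) (m k : Nat) : List String :=
  (List.range m).map (fun j => if k + j < cs.length then String.singleton (cs.getD (k + j) ' ') else " ")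

-- what A's inner loop does to row i: set positions 0..m-1 from offset k while in range
def pvSetSeg (cs : List Char) (k m : Nat) (r : List String) : List String :=
  (List.range m).foldl (fun r j => if k + j < cs.length then r.set j (String.singleton (cs.getD (k + j) ' ')) else r) r

theorem pvSetSeg_succ (cs : List Char) (k m : Nat) (r : List String) :
    pvSetSeg cs k (m + 1) r =
      (if k + m < cs.length then (pvSetSeg cs k m r).set m (String.singleton (cs.getD (k + m) ' ')) else pvSetSeg cs k m r) := by
  simp [pvSetSeg, List.range_succ]

theorem pvSetSeg_length (cs : List Char) (k m : Nat) (r : List String) :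
    (pvSetSeg cs k m r).length = r.length := by
  induction m with
  | zero => simp [pvSetSeg]
  | succ m ih => rw [pvSetSeg_succ]; split <;> simp [ih]

theorem pvSetSeg_append (cs : List Char) (k m : Nat) (r : List String) (x : String) (h : m ≤ r.length) :
    pvSetSeg cs k m (r ++ [x]) = pvSetSeg cs k m r ++ [x] := by
  induction m with
  | zero => simp [pvSetSeg]
  | succ m ih =>
    rw [pvSetSeg_succ, pvSetSeg_succ, ih (by omega)]
    split
    · rw [List.set_append]
      rw [if_pos (by rw [pvSetSeg_length]; omega)]
    · rfl

theorem pvSetSeg_replicate (cs : List Char) (k m : Nat) :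
    pvSetSeg cs k m (List.replicate m " ") = pvRowAt cs m k := by
  induction m with
  | zero => simp [pvSetSeg, pvRowAt]
  | succ m ih =>
    rw [List.replicate_succ' , pvSetSeg_succ, pvSetSeg_append cs k m _ " " (by simp), ih]
    have hlen : (pvRowAt cs m k).length = m := by simp [pvRowAt]
    have hsucc : pvRowAt cs (m + 1) k
        = pvRowAt cs m k ++ [if k + m < cs.length then String.singleton (cs.getD (k + m) ' ') else " "] := by
      unfold pvRowAt
      rw [List.range_succ, List.map_append]
      simp
    rw [hsucc]
    by_cases h : k + m < cs.length
    · rw [if_pos h, if_pos h, List.set_append, if_neg (by rw [hlen]; omega), hlen]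
      simp
    · rw [if_neg h, if_neg h]

-- A's inner loop, fully characterised
theorem pvInner (cs : List Char) (i : Nat) (m : Nat) (M : List (List String)) (k : Nat) :
    (List.range m).foldl (fun (st : List (List String) × Nat) j =>
        if st.2 < cs.length then
          (st.1.modify i (fun row => row.set j (String.singleton (cs.getD st.2 ' '))), st.2 + 1)
        else st) (M, k)
      = (M.modify i (pvSetSeg cs k m), k + min m (cs.length - k)) := by
  induction m with
  | zero =>
    have h0 : pvSetSeg cs k 0 = id := by funext r; simp [pvSetSeg]
    simp only [List.range_zero, List.foldl_nil, h0, List.modify_id, Prod.mk.injEq]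
    exact ⟨trivial, by omega⟩
  | succ m ih =>
    rw [List.range_succ, List.foldl_append, ih]
    simp only [List.foldl_cons, List.foldl_nil]
    by_cases h : k + m < cs.length
    · have hmin : min m (cs.length - k) = m := by omega
      rw [if_pos (by omega)]
      rw [hmin]
      rw [List.modify_modify_eq]
      simp only [Prod.mk.injEq]
      refine ⟨?_, by omega⟩
      congr 1
      funext r
      rw [pvSetSeg_succ, if_pos h]
      rfl
    · rw [if_neg (by omega)]
      simp only [Prod.mk.injEq]
      refine ⟨?_, by omega⟩
      congr 1
      funext r
      rw [pvSetSeg_succ, if_neg h]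

-- the matrix after A has processed the first t rows
def pvMt (cs : List Char) (n m t : Nat) : List (List String) :=
  (List.range n).map (fun r => if r < t then pvRowAt cs m (r * m) else List.replicate m " ")

theorem pvRowAt_min (cs : List Char) (m a : Nat) :
    pvRowAt cs m (min a cs.length) = pvRowAt cs m a := by
  by_cases h : a ≤ cs.length
  · rw [min_eq_left h]
  · unfold pvRowAt
    apply List.map_congr_left
    intro j _
    rw [if_neg (by omega), if_neg (by omega)]

theorem pvModify_Mt (cs : List Char) (n m t : Nat) :
    (pvMt cs n m t).modify t (pvSetSeg cs (min (t * m) cs.length) m) = pvMt cs n m (t + 1) := by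
  apply List.ext_getElem
  · simp [pvMt]
  · intro j h1 h2
    have hj : j < n := by simpa [pvMt] using h2
    rw [List.getElem_modify]
    by_cases hjt : t = j
    · subst hjt
      rw [if_pos rfl]
      simp only [pvMt, List.getElem_map, List.getElem_range]
      rw [if_neg (lt_irrefl t), if_pos (Nat.lt_succ_self t)]
      rw [pvSetSeg_replicate, pvRowAt_min]
    · rw [if_neg hjt]
      simp only [pvMt, List.getElem_map, List.getElem_range]
      by_cases hlt : j < t
      · rw [if_pos hlt, if_pos (by omega)]
      · rw [if_neg hlt, if_neg (by omega)]

-- A's outer loop, fully characterised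
theorem pvOuter (cs : List Char) (n m t : Nat) :
    (List.range t).foldl (fun (st : List (List String) × Nat) i =>
        (List.range m).foldl (fun (st : List (List String) × Nat) j =>
          if st.2 < cs.length then
            (st.1.modify i (fun row => row.set j (String.singleton (cs.getD st.2 ' '))), st.2 + 1)
          else st) st) (pvMt cs n m 0, 0)
      = (pvMt cs n m t, min (t * m) cs.length) := by
  induction t with
  | zero => simp
  | succ t ih =>
    rw [List.range_succ, List.foldl_append, ih]
    simp only [List.foldl_cons, List.foldl_nil]
    rw [pvInner, pvModify_Mt]
    simp only [Prod.mk.injEq]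
    refine ⟨trivial, ?_⟩
    have : (t + 1) * m = t * m + m := by ring
    rw [this]
    omega

-- B's row equals pvRowAt
theorem pvRowB (cs : List Char) (m k : Nat) :
    ((cs.drop k).take m).map (fun ch => String.singleton ch)
        ++ List.replicate (m - ((cs.drop k).take m).length) " " = pvRowAt cs m k := by
  have hlen : ((cs.drop k).take m).length = min m (cs.length - k) := by simp
  apply List.ext_getElem
  · simp [pvRowAt]
  · intro j h1 h2
    have hjm : j < m := by simpa [pvRowAt] using h2
    simp only [pvRowAt, List.getElem_map, List.getElem_range]
    by_cases hj : j < ((cs.drop k).take m).length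
    · rw [List.getElem_append_left (by simpa using hj)]
      have hkl : k + j < cs.length := by omega
      rw [if_pos hkl]
      simp only [List.getElem_map, List.getElem_take, List.getElem_drop]
      congr 1
      rw [List.getD_eq_getElem cs ' ' hkl]
    · rw [List.getElem_append_right (by simpa using (by omega : ((cs.drop k).take m).length ≤ j))]
      rw [if_neg (by omega)]
      simp

-- ===== VERDICT (by name: the statement is the Claim_ definition above) =====
theorem row_write_py_spec : Claim_equal_row_write_py := by
  unfold Claim_equal_row_write_py
  intro text rows cols _
  unfold Spec_row_write_py row_write_py row_write_py_alt
  simp only [PySem.List.pyRange_one, sub_zero, zero_add]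
  simp only [List.map_map, List.foldl_map, Int.toNat_natCast]
  set cs := text.toList with hcs
  set n := rows.toNat with hn
  set m := cols.toNat with hm
  have hmax : max cols 0 = (m : Int) := by omega
  rw [hmax]
  have hinit : List.map ((fun (_ : Int) => List.map ((fun (_ : Int) => " ") ∘ fun (k : Nat) => (k : Int)) (List.range m)) ∘ fun (k : Nat) => (k : Int)) (List.range n) = pvMt cs n m 0 := by
    unfold pvMt
    apply List.map_congr_left
    intro r _
    have : ((fun (_ : Int) => " ") ∘ fun (k : Nat) => (k : Int)) = fun (_ : Nat) => (" " : String) := rfl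
    rw [this, List.map_const', List.length_range]
    simp
  rw [hinit, pvOuter cs n m n]
  unfold pvMt
  apply List.map_congr_left
  intro r hr
  rw [if_pos (List.mem_range.mp hr)]
  simp only [Function.comp_apply]
  have hslice : PySem.List.slice cs (some ((r : Int) * (m : Int))) (some (((r : Int) + 1) * (m : Int))) = (cs.drop (r * m)).take m := by
    have h1 : (r : Int) * (m : Int) = ((r * m : Nat) : Int) := by push_cast; ring
    have h2 : ((r : Int) + 1) * (m : Int) = ((r * m : Nat) : Int) + ((m : Nat) : Int) := by push_cast; ring
    rw [h1, h2, PySem.List.slice_natCast_add]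
  rw [hslice]
  have hlen : ((cs.drop (r * m)).take m).length ≤ m := by simp
  have htn : ((m : Int) - (((cs.drop (r * m)).take m).length : Int)).toNat = m - ((cs.drop (r * m)).take m).length := by omega
  rw [htn, pvRowB]
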